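-- pv_equiv track=rewrite | github.com/NVIDIA/nv-ingest | retrieval-bench/src/retrieval_bench/cli/evaluate.py | _filter_queries_by_positions
-- ===== SOURCE A (Python) =====
-- def _filter_queries_by_positions(query_ids, queries, qrels, query_languages, requested_positions):
--     fq_ids, fq = [], []
--     for idx, (qid, q) in enumerate(zip(query_ids, queries)):
--         if idx in requested_positions:
--             fq_ids.append(qid)
--             fq.append(q)
--     if not fq_ids:
--         raise ValueError("After applying --query-ids, zero queries remain.")
--     fqrels = {qid: qrels[qid] for qid in fq_ids if qid in qrels}
--     fql = {qid: query_languages.get(qid, "unknown") for qid in fq_ids}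
--     return fq_ids, fq, fqrels, fql
-- ===== SOURCE B (Python) =====
-- def _filter_queries_by_positions(query_ids, queries, qrels, query_languages, requested_positions):
--     ids, qs = list(query_ids), list(queries)
--     n = min(len(ids), len(qs))
--     positions = sorted({p for p in requested_positions if 0 <= p < n})
--     if not positions:
--         raise ValueError("After applying --query-ids, zero queries remain.")
--     fq_ids = [ids[p] for p in positions]
--     fq = [qs[p] for p in positions]
--     unique_ids = list(dict.fromkeys(fq_ids))
--     fqrels = {qid: qrels[qid] for qid in unique_ids if qid in qrels}
--     fql = {qid: query_languages.get(qid, "unknown") for qid in unique_ids}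
--     return fq_ids, fq, fqrels, fql
-- ===== Notes on version B (the rewrite author's own statement) =====
-- stated objective: alternative
-- what changed: B replaces A's scan of every zip index with a membership test per index by dedup+range-filter+sort of the requested positions followed by direct indexing, and replaces the dict-building insert loops over fq_ids by first deduplicating fq_ids once and then mapping lookups over the distinct ids.
import Mathlib
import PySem

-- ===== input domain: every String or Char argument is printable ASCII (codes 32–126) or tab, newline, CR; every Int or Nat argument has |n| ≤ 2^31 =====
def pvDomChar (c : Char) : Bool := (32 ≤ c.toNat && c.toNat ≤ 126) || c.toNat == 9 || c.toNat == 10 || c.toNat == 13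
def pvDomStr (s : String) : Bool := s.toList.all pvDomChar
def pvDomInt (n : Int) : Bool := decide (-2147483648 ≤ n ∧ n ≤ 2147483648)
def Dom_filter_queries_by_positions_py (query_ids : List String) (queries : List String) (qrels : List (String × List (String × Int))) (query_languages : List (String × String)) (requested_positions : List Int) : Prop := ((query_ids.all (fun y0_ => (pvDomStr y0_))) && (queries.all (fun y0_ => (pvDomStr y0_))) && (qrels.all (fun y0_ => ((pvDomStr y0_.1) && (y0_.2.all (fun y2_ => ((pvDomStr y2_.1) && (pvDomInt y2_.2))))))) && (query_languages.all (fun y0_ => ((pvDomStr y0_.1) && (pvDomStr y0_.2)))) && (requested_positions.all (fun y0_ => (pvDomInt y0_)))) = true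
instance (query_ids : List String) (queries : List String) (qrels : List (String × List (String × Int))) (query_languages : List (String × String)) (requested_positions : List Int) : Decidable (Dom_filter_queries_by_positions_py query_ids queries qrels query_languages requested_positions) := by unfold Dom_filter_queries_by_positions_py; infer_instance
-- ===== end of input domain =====

-- B replaces A's per-index membership scan by sorting the deduplicated in-range requested
-- positions and indexing directly, and replaces A's dict-insert loops over fq_ids by
-- deduplicating fq_ids once and mapping lookups over the distinct ids.

-- ===== PORT A =====
def filter_queries_by_positions_py (query_ids : List String) (queries : List String) (qrels : List (String × List (String × Int))) (query_languages : List (String × String)) (requested_positions : List Int) : List String × List String × (List (String × List (String × Int))) × (List (String × String)) :=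
  let loop := (PySem.List.enumerate (query_ids.zip queries) 0).foldl
    (fun (acc : List String × List String) ip =>
      if ip.1 ∈ requested_positions then (acc.1 ++ [ip.2.1], acc.2 ++ [ip.2.2]) else acc)
    ([], [])
  let fq_ids := loop.1
  let fq := loop.2
  -- the 'raise ValueError' on empty fq_ids is excluded by Pre_
  let qrelsD := PySem.Dict.mk qrels
  let fqrels := (fq_ids.foldl (fun d qid => if qrelsD.contains qid then d.insert qid (qrelsD.getD qid []) else d) PySem.Dict.empty).items
  let qlD := PySem.Dict.mk query_languages
  let fql := (fq_ids.foldl (fun d qid => d.insert qid (qlD.getD qid "unknown")) PySem.Dict.empty).items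
  (fq_ids, fq, fqrels, fql)

-- ===== PORT B =====
def filter_queries_by_positions_py_alt (query_ids : List String) (queries : List String) (qrels : List (String × List (String × Int))) (query_languages : List (String × String)) (requested_positions : List Int) : List String × List String × (List (String × List (String × Int))) × (List (String × String)) :=
  let n : Int := min (query_ids.length : Int) (queries.length : Int)
  let positions := PySem.List.sorted (PySem.Set.ofList (requested_positions.filter (fun p => decide (0 ≤ p) && decide (p < n)))) (fun x => x) false
  -- the 'raise ValueError' on empty positions is excluded by Pre_
  -- every p in positions satisfies 0 ≤ p < n, so pyGet? is always some: filterMap is the exact list comprehension (no IndexError reachable)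
  let fq_ids := positions.filterMap (fun p => PySem.List.pyGet? query_ids p)
  let fq := positions.filterMap (fun p => PySem.List.pyGet? queries p)
  -- 'list(dict.fromkeys(fq_ids))' = first occurrences of fq_ids in order
  let unique_ids := PySem.Set.ofList fq_ids
  let qrelsD := PySem.Dict.mk qrels
  -- a dict comprehension over distinct keys: its items are exactly this list, in order
  let fqrels := (unique_ids.filter (fun qid => qrelsD.contains qid)).map (fun qid => (qid, qrelsD.getD qid []))
  let qlD := PySem.Dict.mk query_languages
  let fql := unique_ids.map (fun qid => (qid, qlD.getD qid "unknown"))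
  (fq_ids, fq, fqrels, fql)

-- ===== PRECONDITION & SPEC =====
-- Pre_ excludes exactly the inputs on which Python A raises ValueError: those where no
-- requested position falls inside the index range of zip(query_ids, queries).
def Pre_filter_queries_by_positions_py (query_ids : List String) (queries : List String) (qrels : List (String × List (String × Int))) (query_languages : List (String × String)) (requested_positions : List Int) : Prop :=
  ∃ p ∈ requested_positions, 0 ≤ p ∧ p < min (query_ids.length : Int) (queries.length : Int)
instance (query_ids : List String) (queries : List String) (qrels : List (String × List (String × Int))) (query_languages : List (String × String)) (requested_positions : List Int) : Decidable (Pre_filter_queries_by_positions_py query_ids queries qrels query_languages requested_positions) := by unfold Pre_filter_queries_by_positions_py; infer_instance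
def pvWitness_filter_queries_by_positions_py : List String × List String × (List (String × List (String × Int))) × (List (String × String)) × List Int := (["a"], ["what is a"], [("a", [("d1", 1)])], [("a", "en")], [0])

def Spec_filter_queries_by_positions_py (query_ids : List String) (queries : List String) (qrels : List (String × List (String × Int))) (query_languages : List (String × String)) (requested_positions : List Int) (out : List String × List String × (List (String × List (String × Int))) × (List (String × String))) : Prop := out = filter_queries_by_positions_py_alt query_ids queries qrels query_languages requested_positions
-- instance built by hand only because nested-product DecidableEq exceeds the default synthesis size
def pvDecEqOut : DecidableEq (List String × List String × (List (String × List (String × Int))) × (List (String × String))) :=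
  @instDecidableEqProd _ _ inferInstance (@instDecidableEqProd _ _ inferInstance (@instDecidableEqProd _ _ inferInstance inferInstance))
instance (query_ids : List String) (queries : List String) (qrels : List (String × List (String × Int))) (query_languages : List (String × String)) (requested_positions : List Int) (out : List String × List String × (List (String × List (String × Int))) × (List (String × String))) : Decidable (Spec_filter_queries_by_positions_py query_ids queries qrels query_languages requested_positions out) := by unfold Spec_filter_queries_by_positions_py; exact pvDecEqOut _ _

-- ===== CLAIM =====
def Claim_equal_filter_queries_by_positions_py : Prop := ∀ (query_ids : List String) (queries : List String) (qrels : List (String × List (String × Int))) (query_languages : List (String × String)) (requested_positions : List Int), Dom_filter_queries_by_positions_py query_ids queries qrels query_languages requested_positions → Pre_filter_queries_by_positions_py query_ids queries qrels query_languages requested_positions → Spec_filter_queries_by_positions_py query_ids queries qrels query_languages requested_positions (filter_queries_by_positions_py query_ids queries qrels query_languages requested_positions)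

-- ===== LEMMAS AND PROOFS =====

-- proof-side characterisation of A's loop: the selected (qid, q) pairs, indices counted from s
def pvSel (rp : List Int) (zs : List (String × String)) (s : Int) : List (String × String) :=
  match zs with
  | [] => []
  | z :: t => if s ∈ rp then z :: pvSel rp t (s + 1) else pvSel rp t (s + 1)

lemma pvLoopA (rp : List Int) (zs : List (String × String)) (s : Int) (acc : List String × List String) :
    (PySem.List.enumerate zs s).foldl
      (fun (acc : List String × List String) ip =>
        if ip.1 ∈ rp then (acc.1 ++ [ip.2.1], acc.2 ++ [ip.2.2]) else acc) acc
    = (acc.1 ++ (pvSel rp zs s).map Prod.fst, acc.2 ++ (pvSel rp zs s).map Prod.snd) := by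
  induction zs generalizing s acc with
  | nil => simp [pvSel, PySem.List.enumerate_nil]
  | cons z t ih =>
    rw [PySem.List.enumerate_cons]
    simp only [List.foldl_cons]
    by_cases h : s ∈ rp <;> simp [pvSel, h, ih]

lemma pvSel_eq (rp : List Int) (zs : List (String × String)) (s : Int) :
    pvSel rp zs s = ((PySem.List.pyRange s (s + zs.length) 1).filter (fun p => decide (p ∈ rp))).map
      (fun p => zs.getD (p - s).toNat ("", "")) := by
  induction zs generalizing s with
  | nil => simp [pvSel, PySem.List.pyRange_one_eq_nil]
  | cons z t ih =>
    have harith : s + ((z :: t).length : Int) = (s + 1) + (t.length : Int) := by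
      push_cast [List.length_cons]; ring
    have htail : ((PySem.List.pyRange (s + 1) ((s + 1) + (t.length : Int)) 1).filter (fun p => decide (p ∈ rp))).map
        (fun p => (z :: t).getD (p - s).toNat ("", ""))
        = ((PySem.List.pyRange (s + 1) ((s + 1) + (t.length : Int)) 1).filter (fun p => decide (p ∈ rp))).map
        (fun p => t.getD (p - (s + 1)).toNat ("", "")) := by
      apply List.map_congr_left
      intro p hp
      have hge : s + 1 ≤ p := (PySem.List.mem_pyRange_one.mp (List.mem_filter.mp hp).1).1
      have hnat : (p - s).toNat = (p - (s + 1)).toNat + 1 := by omega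
      simp [hnat]
    rw [pvSel, PySem.List.pyRange_one_cons (by push_cast [List.length_cons]; omega), harith,
      List.filter_cons]
    split_ifs with h1 h2 h2
    · rw [List.map_cons, ih, ← htail]
      congr 1
      simp
    · simp [h1] at h2
    · simp [h1] at h2
    · rw [ih, ← htail]

lemma pvPositions_eq (rp : List Int) (n : Int) :
    PySem.List.sorted (PySem.Set.ofList (rp.filter (fun p => decide (0 ≤ p) && decide (p < n)))) (fun x => x) false
    = (PySem.List.pyRange 0 n 1).filter (fun p => decide (p ∈ rp)) := by
  apply PySem.List.sorted_eq_of_perm_of_pairwise_lt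
  · rw [List.perm_ext_iff_of_nodup ((PySem.List.nodup_pyRange_one 0 n).filter _) (PySem.Set.nodup_ofList _)]
    intro p
    simp only [List.mem_filter, PySem.Set.mem_ofList, PySem.List.mem_pyRange_one,
      Bool.and_eq_true, decide_eq_true_eq]
    tauto
  · exact (PySem.List.pairwise_lt_pyRange_one 0 n).filter _

lemma pvFilterMap_eq_map {α β : Type} {l : List α} {f : α → Option β} {g : α → β}
    (h : ∀ x ∈ l, f x = some (g x)) : l.filterMap f = l.map g := by
  induction l with
  | nil => simp
  | cons x t ih =>
    rw [List.filterMap_cons, h x (by simp), List.map_cons, ih (fun y hy => h y (by simp [hy]))]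

-- an insert loop whose value depends only on the key: what getD returns afterwards
lemma pvGetD_foldl_insert {V : Type} (l : List String) (f : String → V) (k : String) (dflt : V)
    (d : PySem.Dict String V) :
    (l.foldl (fun d q => d.insert q (f q)) d).getD k dflt
      = if k ∈ l then f k else d.getD k dflt := by
  induction l generalizing d with
  | nil => simp
  | cons x t ih =>
    rw [List.foldl_cons, ih]
    by_cases ht : k ∈ t
    · simp [ht]
    · by_cases hx : k = x <;> simp [ht, hx, PySem.Dict.getD_insert]

-- an insert loop from empty whose value depends only on the key: its items list
lemma pvItems_foldl_insert {V : Type} (l : List String) (f : String → V) (dflt : V) :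
    (l.foldl (fun d q => d.insert q (f q)) (PySem.Dict.empty : PySem.Dict String V)).items
      = (PySem.Set.ofList l).map (fun k => (k, f k)) := by
  have hkeys : (l.foldl (fun d q => d.insert q (f q)) (PySem.Dict.empty : PySem.Dict String V)).keys
      = PySem.Set.ofList l := by
    rw [PySem.Dict.keys_foldl_insert]
    simp [PySem.Set.update_nil_left]
  have hnd : (l.foldl (fun d q => d.insert q (f q)) (PySem.Dict.empty : PySem.Dict String V)).keys.Nodup :=
    PySem.Dict.nodup_keys_foldl_insert _ _ _ PySem.Dict.nodup_keys_empty
  rw [PySem.Dict.items_eq_map_keys _ hnd dflt, hkeys]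
  apply List.map_congr_left
  intro k hk
  have hkl : k ∈ l := (PySem.Set.mem_ofList _ _).mp hk
  rw [pvGetD_foldl_insert]
  simp [hkl]

-- first occurrences of a filtered list = filtering the first occurrences
lemma pvOfList_filter (l : List String) (c : String → Bool) :
    PySem.Set.ofList (l.filter c) = (PySem.Set.ofList l).filter c := by
  induction l using List.reverseRecOn with
  | nil => simp [PySem.Set.ofList_nil]
  | append_singleton t x ih =>
    rw [List.filter_append, PySem.Set.ofList_append_singleton]
    by_cases hc : c x
    · rw [List.filter_cons_of_pos hc, List.filter_nil, PySem.Set.ofList_append_singleton]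
      by_cases hm : x ∈ t
      · rw [PySem.Set.add_of_mem (by simp [PySem.Set.mem_ofList, List.mem_filter, hm, hc]),
          PySem.Set.add_of_mem (by simp [PySem.Set.mem_ofList, hm]), ih]
      · rw [PySem.Set.add_of_not_mem (by simp [PySem.Set.mem_ofList, List.mem_filter, hm]),
          PySem.Set.add_of_not_mem (by simp [PySem.Set.mem_ofList, hm]),
          List.filter_append, ih]
        simp [hc]
    · simp only [hc, Bool.false_eq_true, not_false_eq_true, List.filter_cons_of_neg,
        List.filter_nil, List.append_nil]
      by_cases hm : x ∈ t
      · rw [PySem.Set.add_of_mem (by simp [PySem.Set.mem_ofList, hm]), ih]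
      · rw [PySem.Set.add_of_not_mem (by simp [PySem.Set.mem_ofList, hm]),
          List.filter_append, ih]
        simp [hc]

-- ===== VERDICT (by name: the statement is the Claim_ definition above) =====
theorem filter_queries_by_positions_py_spec : Claim_equal_filter_queries_by_positions_py := by
  intro query_ids queries qrels query_languages requested_positions _hDom _hPre
  unfold Spec_filter_queries_by_positions_py
  simp only [filter_queries_by_positions_py, filter_queries_by_positions_py_alt]
  set n : Int := min (query_ids.length : Int) (queries.length : Int) with hn
  have hna : n ≤ (query_ids.length : Int) := min_le_left _ _
  have hnb : n ≤ (queries.length : Int) := min_le_right _ _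
  have hzlen : ((query_ids.zip queries).length : Int) = n := by
    rw [List.length_zip]; push_cast; exact hn.symm
  simp only [pvLoopA, pvSel_eq, pvPositions_eq, List.nil_append, zero_add, Int.sub_zero, hzlen]
  have hids : ((PySem.List.pyRange 0 n 1).filter (fun p => decide (p ∈ requested_positions))).filterMap
        (fun p => PySem.List.pyGet? query_ids p)
      = ((PySem.List.pyRange 0 n 1).filter (fun p => decide (p ∈ requested_positions))).map
        (Prod.fst ∘ fun p : Int => (query_ids.zip queries).getD p.toNat ("", "")) := by
    apply pvFilterMap_eq_map
    intro p hp
    obtain ⟨h0, h1⟩ := PySem.List.mem_pyRange_one.mp (List.mem_filter.mp hp).1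
    have hlt : p.toNat < query_ids.length := by omega
    have hltz : p.toNat < (query_ids.zip queries).length := by rw [List.length_zip]; omega
    rw [PySem.List.pyGet?_of_nonneg _ h0, List.getElem?_eq_getElem hlt]
    simp [List.getElem?_eq_getElem hltz, List.getElem_zip]
  have hq : ((PySem.List.pyRange 0 n 1).filter (fun p => decide (p ∈ requested_positions))).filterMap
        (fun p => PySem.List.pyGet? queries p)
      = ((PySem.List.pyRange 0 n 1).filter (fun p => decide (p ∈ requested_positions))).map
        (Prod.snd ∘ fun p : Int => (query_ids.zip queries).getD p.toNat ("", "")) := by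
    apply pvFilterMap_eq_map
    intro p hp
    obtain ⟨h0, h1⟩ := PySem.List.mem_pyRange_one.mp (List.mem_filter.mp hp).1
    have hlt : p.toNat < queries.length := by omega
    have hltz : p.toNat < (query_ids.zip queries).length := by rw [List.length_zip]; omega
    rw [PySem.List.pyGet?_of_nonneg _ h0, List.getElem?_eq_getElem hlt]
    simp [List.getElem?_eq_getElem hltz, List.getElem_zip]
  rw [List.map_map, List.map_map, hids, hq]
  refine Prod.ext rfl (Prod.ext rfl (Prod.ext ?_ ?_))
  · show (List.foldl (fun d qid => if (PySem.Dict.mk qrels).contains qid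
        then d.insert qid ((PySem.Dict.mk qrels).getD qid []) else d) PySem.Dict.empty _).items = _
    rw [← List.foldl_filter,
      pvItems_foldl_insert _ _ [], pvOfList_filter]
  · show (List.foldl (fun d qid => d.insert qid ((PySem.Dict.mk query_languages).getD qid "unknown"))
        PySem.Dict.empty _).items = _
    rw [pvItems_foldl_insert _ _ "unknown"]
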